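-- pv_equiv track=rewrite | github.com/EdgarVi/CptS-355 | HW3/HW3.py | sprintLog
-- ===== SOURCE A (Python) =====
-- def sprintLog(sprnt):
--     d = {}
--     # use iterator for each dev in sprnt
--     for dev in sprnt.keys():
--         for task in sprnt[dev].keys():
--             if(d.get(task) == None):
--                 d[task] = {}
--                 d[task][dev] = sprnt[dev][task] # sprnt[dev][task] is the hour value
--             else:
--                 d[task][dev] = sprnt[dev][task]
--     return d
-- ===== SOURCE B (Python) =====
-- def sprintLog(sprnt):
--     # index-first: collect the ordered set of all task keys, then build the
--     # transpose task-outer with comprehensions (no mutation of a shared dict)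
--     tasks = dict.fromkeys(t for dev in sprnt for t in sprnt[dev])
--     return {task: {dev: sprnt[dev][task] for dev in sprnt if task in sprnt[dev]}
--             for task in tasks}
-- ===== Notes on version B (the rewrite author's own statement) =====
-- stated objective: idiomatic
-- what changed: Replaces A's fused dev-outer mutation loop (conditionally creating inner dicts in a shared accumulator) with an index-first build: one pass collects the ordered set of task keys, then the transpose is built task-outer by nested comprehensions.
import Mathlib
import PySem

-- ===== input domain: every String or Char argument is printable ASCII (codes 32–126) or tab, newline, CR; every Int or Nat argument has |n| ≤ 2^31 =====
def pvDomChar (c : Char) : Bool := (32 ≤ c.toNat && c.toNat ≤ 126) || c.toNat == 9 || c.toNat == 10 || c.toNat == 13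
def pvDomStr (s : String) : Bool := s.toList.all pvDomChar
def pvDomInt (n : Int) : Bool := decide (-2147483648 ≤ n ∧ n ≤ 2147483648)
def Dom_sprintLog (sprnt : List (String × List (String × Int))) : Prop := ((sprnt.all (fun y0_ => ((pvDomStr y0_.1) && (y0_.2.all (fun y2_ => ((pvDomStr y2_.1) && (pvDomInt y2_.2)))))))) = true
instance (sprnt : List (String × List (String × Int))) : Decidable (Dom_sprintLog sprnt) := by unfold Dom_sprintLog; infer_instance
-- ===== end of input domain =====

-- B rebuilds the transpose index-first (ordered task set, then task-outer comprehensions)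
-- instead of A's fused dev-outer mutation loop; objective: simpler/idiomatic, not faster.

-- ===== PORT A =====
-- shared representation helper for the dict-typed argument: `sprnt[dev]` as a PySem.Dict
def pyLookup (sprnt : List (String × List (String × Int))) (dev : String) : PySem.Dict String Int :=
  PySem.Dict.mk (PySem.Dict.getD (PySem.Dict.mk sprnt) dev [])

-- body of A's inner `for task in sprnt[dev].keys(): …`
def sprintLogStepTask (dev : String) (tmap : PySem.Dict String Int)
    (d : PySem.Dict String (PySem.Dict String Int)) (task : String) :
    PySem.Dict String (PySem.Dict String Int) :=
  match d.get? task with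
  | none =>                         -- if d.get(task) == None:
      let d := d.insert task PySem.Dict.empty                                    -- d[task] = {}
      d.modify task PySem.Dict.empty (fun inn => inn.insert dev (tmap.getD task 0))  -- d[task][dev] = sprnt[dev][task]
  | some _ =>
      d.modify task PySem.Dict.empty (fun inn => inn.insert dev (tmap.getD task 0))  -- d[task][dev] = sprnt[dev][task]

-- body of A's outer `for dev in sprnt.keys(): …`
def sprintLogStepDev (sprnt : List (String × List (String × Int)))
    (d : PySem.Dict String (PySem.Dict String Int)) (dev : String) :
    PySem.Dict String (PySem.Dict String Int) :=
  let tmap := pyLookup sprnt dev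
  tmap.keys.foldl (sprintLogStepTask dev tmap) d

def sprintLog (sprnt : List (String × List (String × Int))) : List (String × List (String × Int)) :=
  ((sprnt.map Prod.fst).foldl (sprintLogStepDev sprnt) PySem.Dict.empty).items.map
    (fun p => (p.1, p.2.items))

-- ===== PORT B =====
-- body of B's inner dict comprehension `{dev: sprnt[dev][task] for dev in sprnt if task in sprnt[dev]}`
def altInnerStep (sprnt : List (String × List (String × Int))) (task : String)
    (inn : PySem.Dict String Int) (dev : String) : PySem.Dict String Int :=
  let tmap := pyLookup sprnt dev
  if tmap.contains task then inn.insert dev (tmap.getD task 0) else inn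

def sprintLog_alt (sprnt : List (String × List (String × Int))) : List (String × List (String × Int)) :=
  -- tasks = dict.fromkeys(t for dev in sprnt for t in sprnt[dev])
  let tasks := PySem.List.dedup ((sprnt.map Prod.fst).flatMap (fun dev => (pyLookup sprnt dev).keys))
  -- {task: {…} for task in tasks}
  tasks.map (fun task =>
    (task, ((sprnt.map Prod.fst).foldl (altInnerStep sprnt task) PySem.Dict.empty).items))

-- ===== PRECONDITION & SPEC =====
def Spec_sprintLog (sprnt : List (String × List (String × Int))) (out : List (String × List (String × Int))) : Prop := out = sprintLog_alt sprnt
instance (sprnt : List (String × List (String × Int))) (out : List (String × List (String × Int))) : Decidable (Spec_sprintLog sprnt out) := by unfold Spec_sprintLog; infer_instance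

-- ===== CLAIM (what is proved, stated in full; the proofs are below) =====
def Claim_equal_sprintLog : Prop := ∀ (sprnt : List (String × List (String × Int))), Dom_sprintLog sprnt → Spec_sprintLog sprnt (sprintLog sprnt)

-- ===== LEMMAS AND PROOFS =====

-- A's two branches both amount to an insert of the updated (or fresh) inner dict.
theorem stepTask_eq (dev : String) (tmap : PySem.Dict String Int)
    (d : PySem.Dict String (PySem.Dict String Int)) (task : String) :
    sprintLogStepTask dev tmap d task =
      d.insert task ((d.getD task PySem.Dict.empty).insert dev (tmap.getD task 0)) := by
  unfold sprintLogStepTask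
  cases h : d.get? task with
  | none =>
      show (d.insert task PySem.Dict.empty).insert task
          (((d.insert task PySem.Dict.empty).getD task PySem.Dict.empty).insert dev (tmap.getD task 0)) = _
      rw [PySem.Dict.getD_insert_self, PySem.Dict.insert_insert_self,
        PySem.Dict.getD_of_get?_eq_none d PySem.Dict.empty h]
  | some inn => rfl

-- invariant of A's inner task loop over one dev
theorem foldTask_items (dev : String) (tmap : PySem.Dict String Int)
    (tasks : List String) (hnd : tasks.Nodup)
    (inner : String → PySem.Dict String Int)
    (L : List String) (d : PySem.Dict String (PySem.Dict String Int))
    (hd : d.items = tasks.map (fun t => (t, inner t))) :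
    (L.foldl (sprintLogStepTask dev tmap) d).items =
      (PySem.Set.update tasks L).map (fun t => (t,
        if t ∈ L then (if t ∈ tasks then inner t else PySem.Dict.empty).insert dev (tmap.getD t 0)
        else inner t)) := by
  induction L using List.reverseRecOn with
  | nil => simpa [PySem.Set.update_nil] using hd
  | append_singleton L x ih =>
      rw [List.foldl_append, List.foldl_cons, List.foldl_nil, stepTask_eq]
      set d₁ := L.foldl (sprintLogStepTask dev tmap) d with hd₁
      set g : List String → String → String × PySem.Dict String Int := fun M t => (t,
        if t ∈ M then (if t ∈ tasks then inner t else PySem.Dict.empty).insert dev (tmap.getD t 0)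
        else inner t) with hg
      have hitems : d₁.items = (PySem.Set.update tasks L).map (g L) := ih
      have hkeys : d₁.keys = PySem.Set.update tasks L := by
        show d₁.items.map Prod.fst = _
        rw [hitems, List.map_map]
        simp only [hg, Function.comp_def]
        exact List.map_id _
      have hknd : d₁.keys.Nodup := by rw [hkeys]; exact PySem.Set.nodup_update tasks L hnd
      rw [PySem.Set.update_append]
      by_cases hx : x ∈ PySem.Set.update tasks L
      · have hcont : d₁.contains x = true :=
          (PySem.Dict.contains_iff_mem_keys _ _).mpr (by rw [hkeys]; exact hx)
        have hmem : (x, (g L x).2) ∈ d₁.items := by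
          rw [hitems]; exact List.mem_map_of_mem hx
        have hgd : d₁.getD x PySem.Dict.empty = (g L x).2 :=
          PySem.Dict.getD_of_mem_items d₁ hmem hknd _
        have hupd : (PySem.Set.update tasks L).update [x] = PySem.Set.update tasks L := by
          rw [PySem.Set.update_cons, PySem.Set.update_nil, PySem.Set.add_of_mem hx]
        rw [PySem.Dict.items_insert_of_contains d₁ _ hcont, hitems, List.map_map, hupd, hgd]
        apply List.map_congr_left
        intro t ht
        by_cases hte : t = x
        · subst hte
          simp only [Function.comp, hg, beq_self_eq_true, if_pos, List.mem_append,
            List.mem_singleton, or_true]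
          by_cases htL : t ∈ L
          · rw [if_pos htL, PySem.Dict.insert_insert_self]
          · have htT : t ∈ tasks := by
              rcases (PySem.Set.mem_update tasks L t).mp ht with h' | h'
              · exact h'
              · exact absurd h' htL
            rw [if_neg htL, if_pos htT]
        · have : (t == x) = false := by simp [hte]
          simp only [Function.comp, hg, this, Bool.false_eq_true, if_false,
            List.mem_append, List.mem_singleton, hte, or_false]
      · have hcont : d₁.contains x = false := by
          rw [Bool.eq_false_iff]
          intro hh
          exact hx (by rw [← hkeys]; exact (PySem.Dict.contains_iff_mem_keys _ _).mp hh)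
        have hupd : (PySem.Set.update tasks L).update [x] = PySem.Set.update tasks L ++ [x] := by
          rw [PySem.Set.update_cons, PySem.Set.update_nil, PySem.Set.add_of_not_mem hx]
        have hxT : x ∉ tasks := fun h' => hx ((PySem.Set.mem_update tasks L x).mpr (Or.inl h'))
        have hxL : x ∉ L := fun h' => hx ((PySem.Set.mem_update tasks L x).mpr (Or.inr h'))
        rw [PySem.Dict.items_insert_of_not_contains d₁ _ hcont,
          PySem.Dict.getD_of_not_contains d₁ _ hcont, hitems, hupd, List.map_append]
        congr 1
        · apply List.map_congr_left
          intro t ht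
          have hte : t ≠ x := fun h' => hx (h' ▸ ht)
          simp only [hg, List.mem_append, List.mem_singleton, hte, or_false]
        · simp [hxT]

-- a task that occurs for no dev of the prefix has an empty inner dict in B
theorem innerAll_empty (sprnt : List (String × List (String × Int))) (devs : List String) (t : String)
    (h : ∀ dev ∈ devs, t ∉ (pyLookup sprnt dev).keys) :
    devs.foldl (altInnerStep sprnt t) PySem.Dict.empty = PySem.Dict.empty := by
  induction devs with
  | nil => rfl
  | cons dev devs ih =>
      have hc : (pyLookup sprnt dev).contains t = false := by
        rw [Bool.eq_false_iff]
        intro hh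
        exact h dev (by simp) ((PySem.Dict.contains_iff_mem_keys _ _).mp hh)
      simp only [List.foldl_cons, altInnerStep, hc, Bool.false_eq_true, if_false]
      exact ih (fun dv hv => h dv (by simp [hv]))

-- invariant of A's outer dev loop: its dict is B's task-indexed table
theorem foldDev_items (sprnt : List (String × List (String × Int))) (devs : List String) :
    (devs.foldl (sprintLogStepDev sprnt) PySem.Dict.empty).items =
      (PySem.Set.ofList (devs.flatMap (fun dev => (pyLookup sprnt dev).keys))).map
        (fun t => (t, devs.foldl (altInnerStep sprnt t) PySem.Dict.empty)) := by
  induction devs using List.reverseRecOn with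
  | nil => rfl
  | append_singleton devs dev ih =>
      rw [List.foldl_append, List.foldl_cons, List.foldl_nil]
      show ((pyLookup sprnt dev).keys.foldl (sprintLogStepTask dev (pyLookup sprnt dev))
          (devs.foldl (sprintLogStepDev sprnt) PySem.Dict.empty)).items = _
      rw [foldTask_items dev (pyLookup sprnt dev) _ (PySem.Set.nodup_ofList _) _ _ _ ih]
      rw [List.flatMap_append]
      simp only [List.flatMap_cons, List.flatMap_nil, List.append_nil]
      rw [PySem.Set.ofList_append]
      apply List.map_congr_left
      intro t ht
      rw [List.foldl_append, List.foldl_cons, List.foldl_nil]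
      show _ = (t, altInnerStep sprnt t (devs.foldl (altInnerStep sprnt t) PySem.Dict.empty) dev)
      have hstep : ∀ inn, altInnerStep sprnt t inn dev =
          if (pyLookup sprnt dev).contains t = true then
            inn.insert dev ((pyLookup sprnt dev).getD t 0) else inn := fun _ => rfl
      rw [hstep]
      by_cases htk : t ∈ (pyLookup sprnt dev).keys
      · have hc : (pyLookup sprnt dev).contains t = true :=
          (PySem.Dict.contains_iff_mem_keys _ _).mpr htk
        rw [if_pos htk]
        simp only [hc, if_true]
        by_cases htT : t ∈ PySem.Set.ofList (devs.flatMap (fun dv => (pyLookup sprnt dv).keys))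
        · rw [if_pos htT]
        · rw [if_neg htT, innerAll_empty sprnt devs t]
          intro dv hv hk
          exact htT ((PySem.Set.mem_ofList _ _).mpr (List.mem_flatMap.mpr ⟨dv, hv, hk⟩))
      · have hc : (pyLookup sprnt dev).contains t = false := by
          rw [Bool.eq_false_iff]
          intro hh
          exact htk ((PySem.Dict.contains_iff_mem_keys _ _).mp hh)
        rw [if_neg htk]
        simp only [hc, Bool.false_eq_true, if_false]


-- ===== VERDICT (by name: the statement is the Claim_ definition above) =====
theorem sprintLog_spec : Claim_equal_sprintLog := by
  intro sprnt _
  show sprintLog sprnt = sprintLog_alt sprnt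
  unfold sprintLog sprintLog_alt
  rw [foldDev_items, List.map_map]
  rfl
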